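-- pv_equiv track=rewrite | github.com/the-squad/excelify | api/Code/WordSegmentation.py | get_phrase_boundaries
-- ===== SOURCE A (Python) =====
-- def get_phrase_boundaries(col_white_pixels):
--     begin = 0
--     for col in col_white_pixels:
--         if col > 0:
--             break
--         begin += 1
--     last = len(col_white_pixels)
--     for col in reversed(col_white_pixels):
--         if col > 0:
--             break
--         last -= 1
--     return begin, last
-- ===== SOURCE B (Python) =====
-- def get_phrase_boundaries(col_white_pixels):
--     first = None
--     last_pos = None
--     for i, col in enumerate(col_white_pixels):
--         if col > 0:
--             if first is None:
--                 first = i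
--             last_pos = i
--     if first is None:
--         return len(col_white_pixels), 0
--     return first, last_pos + 1
-- ===== Notes on version B (the rewrite author's own statement) =====
-- stated objective: alternative
-- what changed: Replaced A's two opposite-direction scans (forward for begin, reversed for last) by one forward pass over enumerate that records the first and most recent positive index, deriving (begin, last) afterwards.
import Mathlib
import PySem

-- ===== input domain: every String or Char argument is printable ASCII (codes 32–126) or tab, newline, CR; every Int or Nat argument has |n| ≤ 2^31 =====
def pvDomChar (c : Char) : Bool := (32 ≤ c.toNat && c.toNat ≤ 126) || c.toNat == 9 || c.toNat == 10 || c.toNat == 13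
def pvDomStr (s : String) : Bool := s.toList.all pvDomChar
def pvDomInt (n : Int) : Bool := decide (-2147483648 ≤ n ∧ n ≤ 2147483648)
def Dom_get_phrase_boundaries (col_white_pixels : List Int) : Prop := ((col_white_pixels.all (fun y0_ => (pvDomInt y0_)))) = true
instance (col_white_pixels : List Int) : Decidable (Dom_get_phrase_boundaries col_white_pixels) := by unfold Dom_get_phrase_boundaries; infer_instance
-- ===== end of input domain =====

-- B replaces A's two opposite-direction scans by one forward pass over enumerate
-- recording the first and most recent positive index (objective: alternative).

-- ===== PORT A =====
-- first loop: begin = 0; for col in col_white_pixels: if col > 0: break; begin += 1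
def pvABegin : List Int → Int
  | [] => 0
  | c :: t => if c > 0 then 0 else pvABegin t + 1

-- second loop: last = len; for col in reversed(...): if col > 0: break; last -= 1
def pvALast : List Int → Int → Int
  | [], n => n
  | c :: t, n => if c > 0 then n else pvALast t (n - 1)

def get_phrase_boundaries (col_white_pixels : List Int) : Int × Int :=
  (pvABegin col_white_pixels,
   pvALast col_white_pixels.reverse (col_white_pixels.length : Int))

-- ===== PORT B =====
-- single forward pass over enumerate, state = (first positive index?, most recent positive index?)
def pvBStep (s : Option Int × Option Int) (p : Int × Int) : Option Int × Option Int :=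
  if p.2 > 0 then (if s.1 = none then some p.1 else s.1, some p.1) else s

def get_phrase_boundaries_alt (col_white_pixels : List Int) : Int × Int :=
  let st := (PySem.List.enumerate col_white_pixels).foldl pvBStep (none, none)
  match st.1 with
  | none => ((col_white_pixels.length : Int), 0)
  | some f => (f, st.2.getD 0 + 1)   -- st.2 is some whenever st.1 is; getD 0 is the None placeholder

-- ===== PRECONDITION & SPEC =====
def Spec_get_phrase_boundaries (col_white_pixels : List Int) (out : Int × Int) : Prop := out = get_phrase_boundaries_alt col_white_pixels
instance (col_white_pixels : List Int) (out : Int × Int) : Decidable (Spec_get_phrase_boundaries col_white_pixels out) := by unfold Spec_get_phrase_boundaries; infer_instance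

-- ===== CLAIM (what is proved, stated in full; the proofs are below) =====
def Claim_equal_get_phrase_boundaries : Prop := ∀ (col_white_pixels : List Int), Dom_get_phrase_boundaries col_white_pixels → Spec_get_phrase_boundaries col_white_pixels (get_phrase_boundaries col_white_pixels)

-- ===== LEMMAS AND PROOFS =====

-- component folds of pvBStep
def pvG1 (o : Option Int) (p : Int × Int) : Option Int :=
  if p.2 > 0 then (if o = none then some p.1 else o) else o
def pvG2 (o : Option Int) (p : Int × Int) : Option Int :=
  if p.2 > 0 then some p.1 else o

theorem foldl_pvBStep_split (ps : List (Int × Int)) (o1 o2 : Option Int) :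
    ps.foldl pvBStep (o1, o2) = (ps.foldl pvG1 o1, ps.foldl pvG2 o2) := by
  induction ps generalizing o1 o2 with
  | nil => rfl
  | cons p t ih =>
    simp only [List.foldl_cons, pvBStep, pvG1, pvG2]
    split_ifs <;> exact ih _ _

theorem foldl_pvG1_some (ps : List (Int × Int)) (x : Int) :
    ps.foldl pvG1 (some x) = some x := by
  induction ps with
  | nil => rfl
  | cons p t ih =>
    rw [List.foldl_cons]
    have h : pvG1 (some x) p = some x := by unfold pvG1; split_ifs <;> simp_all
    rw [h]; exact ih

theorem pvABegin_all (l : List Int) (h : l.all (fun x => decide (x ≤ 0)) = true) :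
    pvABegin l = (l.length : Int) := by
  induction l with
  | nil => rfl
  | cons c t ih =>
    simp only [List.all_cons, Bool.and_eq_true, decide_eq_true_eq] at h
    simp only [pvABegin, List.length_cons]
    rw [if_neg (by omega), ih h.2]
    push_cast; ring

theorem pvALast_eq (r : List Int) (n : Int) : pvALast r n = n - pvABegin r := by
  induction r generalizing n with
  | nil => simp [pvALast, pvABegin]
  | cons c t ih =>
    simp only [pvALast, pvABegin]
    split_ifs with h
    · simp
    · rw [ih]; ring

theorem foldl_pvG1_none (l : List Int) (s : Int) :
    (PySem.List.enumerate l s).foldl pvG1 none =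
      (if l.all (fun x => decide (x ≤ 0)) then none else some (s + pvABegin l)) := by
  induction l generalizing s with
  | nil => rfl
  | cons c t ih =>
    rw [PySem.List.enumerate_cons, List.foldl_cons]
    by_cases hc : c > 0
    · have h1 : pvG1 none (s, c) = some s := by simp [pvG1, hc]
      rw [h1, foldl_pvG1_some,
        if_neg (by simp only [List.all_cons, Bool.and_eq_true, decide_eq_true_eq]
                   rintro ⟨h1, _⟩; omega)]
      simp [pvABegin, hc]
    · have h1 : pvG1 none (s, c) = none := by simp [pvG1, hc]
      rw [h1, ih]
      have hall : ((c :: t).all fun x => decide (x ≤ 0)) = (t.all fun x => decide (x ≤ 0)) := by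
        have : c ≤ 0 := by omega
        simp [List.all_cons, this]
      rw [hall]
      split_ifs with h
      · rfl
      · simp only [pvABegin, if_neg hc]
        congr 1; ring

theorem foldl_pvG2_none (l : List Int) (s : Int) :
    (PySem.List.enumerate l s).foldl pvG2 none =
      (if l.all (fun x => decide (x ≤ 0)) then none
       else some (s + ((l.length : Int) - 1 - pvABegin l.reverse))) := by
  induction l using List.reverseRecOn generalizing s with
  | nil => rfl
  | append_singleton t c ih =>
    rw [PySem.List.enumerate_append, List.foldl_append]
    simp only [PySem.List.enumerate_cons, PySem.List.enumerate_nil, List.foldl_cons,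
      List.foldl_nil]
    by_cases hc : c > 0
    · have h1 : ∀ o, pvG2 o ((s + (t.length : Int), c)) = some (s + (t.length : Int)) := by
        intro o; simp [pvG2, hc]
      rw [h1,
        if_neg (by simp only [List.all_append, List.all_cons, List.all_nil,
                     Bool.and_eq_true, decide_eq_true_eq]
                   rintro ⟨_, h2, _⟩; omega)]
      congr 1
      have hrev : pvABegin (t ++ [c]).reverse = 0 := by
        simp [List.reverse_append, pvABegin, hc]
      rw [hrev]
      simp only [List.length_append, List.length_cons, List.length_nil]
      push_cast; ring
    · have h1 : ∀ o, pvG2 o ((s + (t.length : Int), c)) = o := by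
        intro o; simp [pvG2, hc]
      rw [h1, ih]
      have hall : ((t ++ [c]).all fun x => decide (x ≤ 0)) = (t.all fun x => decide (x ≤ 0)) := by
        have : c ≤ 0 := by omega
        simp [List.all_append, this]
      rw [hall]
      split_ifs with h
      · rfl
      · congr 1
        have hrev : pvABegin (t ++ [c]).reverse = pvABegin t.reverse + 1 := by
          simp [List.reverse_append, pvABegin, hc]
        rw [hrev]
        simp only [List.length_append, List.length_cons, List.length_nil]
        push_cast; ring

theorem get_phrase_boundaries_spec : Claim_equal_get_phrase_boundaries := by
  intro l _
  unfold Spec_get_phrase_boundaries get_phrase_boundaries get_phrase_boundaries_alt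
  rw [foldl_pvBStep_split, foldl_pvG1_none, foldl_pvG2_none]
  by_cases h : l.all (fun x => decide (x ≤ 0)) = true
  · simp only [if_pos h]
    have h1 : pvABegin l = (l.length : Int) := pvABegin_all l h
    have h2 : pvABegin l.reverse = (l.length : Int) := by
      rw [pvABegin_all l.reverse (by simpa using h)]; simp
    rw [pvALast_eq, h1, h2]
    simp
  · simp only [if_neg h]
    rw [pvALast_eq]
    simp only [Option.getD_some, Prod.mk.injEq]
    constructor <;> ring
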